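-- pv_equiv track=rewrite | github.com/sarthak144/Relevance-Of-Youtube-Relevance | VideoAnalyser.py | GetVideoCaption
-- ===== SOURCE A (Python) =====
-- def GetVideoCaption(Videos):
--     VideoCaption = {"Yes": 0, "No": 0,"Unavailable": 0}
--     for i in Videos:
--         if Videos[i]['VideoCaption']=="Unavailable":
--             VideoCaption["Unavailable"]+=1
--         elif Videos[i]['VideoCaption']:
--             VideoCaption["Yes"]+=1
--         else:
--             VideoCaption["No"]+=1
--     return VideoCaption
-- ===== SOURCE B (Python) =====
-- def GetVideoCaption(Videos):
--     caps = [v['VideoCaption'] for v in Videos.values()]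
--     unavailable = caps.count("Unavailable")
--     no = sum(1 for c in caps if not c)
--     return {"Yes": len(caps) - unavailable - no, "No": no, "Unavailable": unavailable}
-- ===== Notes on version B (the rewrite author's own statement) =====
-- stated objective: alternative
-- what changed: Replaces the single key-iteration loop with if/elif/else counter updates by extracting the caption list once and computing each bucket independently (count of 'Unavailable', count of falsy values, Yes as the remainder), building the result dict in one step.
import Mathlib
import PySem

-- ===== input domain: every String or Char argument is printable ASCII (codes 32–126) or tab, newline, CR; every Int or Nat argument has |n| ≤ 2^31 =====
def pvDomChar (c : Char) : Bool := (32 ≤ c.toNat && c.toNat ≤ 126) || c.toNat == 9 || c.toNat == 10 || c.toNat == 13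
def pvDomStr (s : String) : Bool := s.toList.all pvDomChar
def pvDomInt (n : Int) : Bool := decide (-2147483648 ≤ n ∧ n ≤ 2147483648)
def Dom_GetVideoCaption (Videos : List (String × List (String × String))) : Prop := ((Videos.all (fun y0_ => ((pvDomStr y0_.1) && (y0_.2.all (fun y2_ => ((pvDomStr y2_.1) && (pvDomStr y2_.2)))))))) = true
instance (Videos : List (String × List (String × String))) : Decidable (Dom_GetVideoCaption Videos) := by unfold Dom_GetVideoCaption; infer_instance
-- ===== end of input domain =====

-- B computes the three caption buckets independently from the extracted caption list instead of one if/elif/else loop.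


-- ===== PORT A =====
-- for i in Videos: look up Videos[i]['VideoCaption'] and bump the matching counter.
-- The getD defaults are unreachable under Pre_ (keys present, outer keys distinct).
def GetVideoCaption (Videos : List (String × List (String × String))) : List (String × Int) :=
  let vd := PySem.Dict.mk Videos
  let final := vd.keys.foldl (fun d i =>
      let cap := (PySem.Dict.mk (vd.getD i [])).getD "VideoCaption" ""
      if cap = "Unavailable" then d.modify "Unavailable" 0 (· + 1)
      else if cap ≠ "" then d.modify "Yes" 0 (· + 1)
      else d.modify "No" 0 (· + 1))
    (PySem.Dict.mk [("Yes", 0), ("No", 0), ("Unavailable", 0)])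
  final.items

-- ===== PORT B =====
def GetVideoCaption_alt (Videos : List (String × List (String × String))) : List (String × Int) :=
  let caps := Videos.map (fun p => (PySem.Dict.mk p.2).getD "VideoCaption" "")
  let unavailable : Int := caps.count "Unavailable"
  let no : Int := (caps.filter (fun c => c = "")).length
  [("Yes", (caps.length : Int) - unavailable - no), ("No", no), ("Unavailable", unavailable)]

-- ===== PRECONDITION & SPEC =====
-- Pre_ excludes inputs where Python A (and B) raise KeyError ('VideoCaption' missing in some
-- inner dict) and association lists with duplicate outer keys, which do not represent a Python dict.
def Pre_GetVideoCaption (Videos : List (String × List (String × String))) : Prop :=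
  (Videos.map (·.1)).Nodup ∧ ∀ p ∈ Videos, (PySem.Dict.mk p.2).contains "VideoCaption" = true
instance (Videos : List (String × List (String × String))) : Decidable (Pre_GetVideoCaption Videos) := by unfold Pre_GetVideoCaption; infer_instance
def pvWitness_GetVideoCaption : (List (String × List (String × String))) :=
  [("a", [("VideoCaption", "Unavailable")]), ("b", [("VideoCaption", "")])]
def Spec_GetVideoCaption (Videos : List (String × List (String × String))) (out : List (String × Int)) : Prop := out = GetVideoCaption_alt Videos
instance (Videos : List (String × List (String × String))) (out : List (String × Int)) : Decidable (Spec_GetVideoCaption Videos out) := by unfold Spec_GetVideoCaption; infer_instance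

-- ===== CLAIM (what is proved, stated in full; the proofs are below) =====
def Claim_equal_GetVideoCaption : Prop := ∀ (Videos : List (String × List (String × String))), Dom_GetVideoCaption Videos → Pre_GetVideoCaption Videos → Spec_GetVideoCaption Videos (GetVideoCaption Videos)

-- ===== LEMMAS AND PROOFS =====

-- counting predicates for the three buckets
def pYes (c : String) : Bool := !(c == "Unavailable") && !(c == "")
def pNo (c : String) : Bool := (c == "")

-- A's loop looks each key up in the whole dict; with distinct keys this is the pair's own value.
theorem fold_lookup_eq {F : PySem.Dict String Int → List (String × String) → PySem.Dict String Int}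
    (V W : List (String × List (String × String)))
    (hsub : ∀ p ∈ V, (PySem.Dict.mk W).getD p.1 [] = p.2) (d : PySem.Dict String Int) :
    (V.map (·.1)).foldl (fun d i => F d ((PySem.Dict.mk W).getD i [])) d
      = V.foldl (fun d p => F d p.2) d := by
  induction V generalizing d with
  | nil => rfl
  | cons p t ih =>
    simp only [List.map_cons, List.foldl_cons]
    rw [hsub p (by simp)]
    exact ih (fun q hq => hsub q (by simp [hq])) _

theorem modY (y n u : Int) :
    (PySem.Dict.mk [("Yes", y), ("No", n), ("Unavailable", u)]).modify "Yes" 0 (· + 1)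
      = PySem.Dict.mk [("Yes", y + 1), ("No", n), ("Unavailable", u)] := rfl

theorem modN (y n u : Int) :
    (PySem.Dict.mk [("Yes", y), ("No", n), ("Unavailable", u)]).modify "No" 0 (· + 1)
      = PySem.Dict.mk [("Yes", y), ("No", n + 1), ("Unavailable", u)] := rfl

theorem modU (y n u : Int) :
    (PySem.Dict.mk [("Yes", y), ("No", n), ("Unavailable", u)]).modify "Unavailable" 0 (· + 1)
      = PySem.Dict.mk [("Yes", y), ("No", n), ("Unavailable", u + 1)] := rfl

-- the counter loop, characterised by per-bucket counts of the extracted captions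
theorem fold_count {α : Type} (g : α → String) (l : List α) (y n u : Int) :
    (l.foldl (fun d x =>
        if g x = "Unavailable" then d.modify "Unavailable" 0 (· + 1)
        else if g x ≠ "" then d.modify "Yes" 0 (· + 1)
        else d.modify "No" 0 (· + 1))
      (PySem.Dict.mk [("Yes", y), ("No", n), ("Unavailable", u)])).items
    = [("Yes", y + (l.map g).countP pYes), ("No", n + (l.map g).countP pNo),
       ("Unavailable", u + (l.map g).count "Unavailable")] := by
  induction l generalizing y n u with
  | nil => simp
  | cons x t ih =>
    simp only [List.foldl_cons, List.map_cons]
    by_cases hu : g x = "Unavailable"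
    · rw [if_pos hu, modU, ih]
      simp [pYes, pNo, hu]
      ring
    · rw [if_neg hu]
      by_cases he : g x = ""
      · rw [if_neg (by simp [he]), modN, ih]
        simp [pYes, pNo, he]
        ring
      · rw [if_pos he, modY, ih]
        simp [pYes, pNo, he, hu]
        ring

-- the three bucket counts partition the caption list
theorem tri (caps : List String) :
    caps.countP pYes + caps.countP pNo + caps.count "Unavailable" = caps.length := by
  induction caps with
  | nil => rfl
  | cons c t ih =>
    by_cases hu : c = "Unavailable" <;> by_cases he : c = "" <;>
      simp_all [pYes, pNo] <;> omega

-- ===== VERDICT (by name: the statement is the Claim_ definition above) =====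
theorem GetVideoCaption_spec : Claim_equal_GetVideoCaption := by
  intro Videos _ hpre
  obtain ⟨hnd, _⟩ := hpre
  unfold Spec_GetVideoCaption GetVideoCaption GetVideoCaption_alt
  simp only []
  have hsub : ∀ p ∈ Videos, (PySem.Dict.mk Videos).getD p.1 [] = p.2 := by
    intro p hp
    exact PySem.Dict.getD_of_mem_items _ (by simpa using hp)
      (by simpa [PySem.Dict.keys] using hnd) []
  have hkeys : (PySem.Dict.mk Videos).keys = Videos.map (·.1) := by
    simp [PySem.Dict.keys]
  rw [hkeys, fold_lookup_eq (F := fun d cap =>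
        if (PySem.Dict.mk cap).getD "VideoCaption" "" = "Unavailable" then d.modify "Unavailable" 0 (· + 1)
        else if (PySem.Dict.mk cap).getD "VideoCaption" "" ≠ "" then d.modify "Yes" 0 (· + 1)
        else d.modify "No" 0 (· + 1)) Videos Videos hsub,
      fold_count (g := fun p => (PySem.Dict.mk p.2).getD "VideoCaption" "") Videos 0 0 0]
  have htri := tri (Videos.map (fun p => (PySem.Dict.mk p.2).getD "VideoCaption" ""))
  have hfun : pNo = fun c => decide (c = "") := by
    funext c; by_cases h : c = "" <;> simp [pNo, h]
  rw [← hfun, ← List.countP_eq_length_filter]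
  simp only [zero_add, List.cons.injEq, Prod.mk.injEq, and_true, true_and]
  omega
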